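-- pv_equiv track=rewrite | github.com/adc-connect/adcc | adcc/block.py | _sort_anticommuting
-- ===== SOURCE A (Python) =====
-- from collections.abc import Callable
-- from typing import TypeVar, Any, Union
--
-- T = TypeVar("T")
--
-- def _sort_anticommuting(to_sort: list[T],
--                         key: Union[Callable[[T], Any], None] = None
--                         ) -> tuple[list[T], int]:
--     """
--     Sort a list of mutually anticommuting operators into canonical order.
--
--     All elements in ``to_sort`` are assumed to anticommute pairwise.  The
--     sorting is performed via a bidirectional bubble sort.
--
--     Parameters
--     ----------
--     to_sort : list[T]
--         List of operators (or any comparable objects) to be sorted.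
--     key : callable, optional
--         Optional function mapping each element of ``to_sort`` to a comparison
--         key.  If ``None`` (default), the elements themselves are compared.
--
--     Returns
--     -------
--     to_sort : list[T]
--         The operators sorted into canonical order.
--     sign : int
--         The sign accumulated from the reordering, i.e. ``+1`` or ``-1``.
--     """
--     verified = False
--     sign = 1
--     rng = tuple(range(len(to_sort) - 1))
--     rev = tuple(range(len(to_sort) - 3, -1, -1))
--
--     def _identity(x):
--         return x
--
--     if key is None:
--         key = _identity
--
--     keys = list(map(key, to_sort))
--     to_sort = list(to_sort)
--
--     while not verified:
--         verified = True
--         for i in rng: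
--             left = keys[i]
--             right = keys[i + 1]
--             if left > right:
--                 verified = False
--                 keys[i], keys[i + 1] = right, left
--                 to_sort[i], to_sort[i + 1] = to_sort[i + 1], to_sort[i]
--                 sign *= -1
--         if verified:
--             break
--         for i in rev:
--             left = keys[i]
--             right = keys[i + 1]
--             if left > right:
--                 verified = False
--                 keys[i], keys[i + 1] = right, left
--                 to_sort[i], to_sort[i + 1] = to_sort[i + 1], to_sort[i]
--                 sign *= -1
--     return (to_sort, sign)
-- ===== SOURCE B (Python) =====
-- def _sort_anticommuting(to_sort, key=None):
--     """Single-pass insertion sort: insert each operator behind the run of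
--     strictly greater keys, flipping the sign once per anticommuting swap."""
--     if key is None:
--         def key(x):
--             return x
--     skeys = []
--     result = []
--     sign = 1
--     for x in to_sort:
--         k = key(x)
--         cnt = 0
--         while cnt < len(skeys) and skeys[len(skeys) - 1 - cnt] > k:
--             cnt += 1
--         pos = len(skeys) - cnt
--         skeys.insert(pos, k)
--         result.insert(pos, x)
--         if cnt % 2:
--             sign = -sign
--     return (result, sign)
-- ===== Notes on version B (the rewrite author's own statement) =====
-- stated objective: alternative
-- what changed: Replaces the repeated bidirectional bubble passes (cocktail sort to fixpoint) by a single left-to-right insertion-sort pass that inserts each element behind the run of strictly greater keys and flips the sign once per element passed.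
import Mathlib
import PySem

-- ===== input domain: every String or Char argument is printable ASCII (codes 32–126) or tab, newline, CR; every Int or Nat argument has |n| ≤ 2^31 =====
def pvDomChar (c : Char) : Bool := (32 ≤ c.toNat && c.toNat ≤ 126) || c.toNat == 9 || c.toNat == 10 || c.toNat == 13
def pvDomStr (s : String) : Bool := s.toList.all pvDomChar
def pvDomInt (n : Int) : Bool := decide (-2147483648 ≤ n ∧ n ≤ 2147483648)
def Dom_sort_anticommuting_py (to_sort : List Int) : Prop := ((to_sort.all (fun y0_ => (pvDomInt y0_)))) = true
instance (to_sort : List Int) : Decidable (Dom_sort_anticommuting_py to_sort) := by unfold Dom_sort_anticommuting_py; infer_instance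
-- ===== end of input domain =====

-- B replaces A's cocktail sort (repeated bidirectional bubble passes) by one insertion-sort
-- pass that flips the sign once per strictly greater key passed.
-- key = None in this instantiation, so keys = to_sort and both parallel lists of A receive
-- identical swaps; the ports therefore carry the single list.

-- ===== PORT A =====
-- inversion count: termination measure for A's while loop (cited by decreasing_by)
def invc : List Int → Nat
  | [] => 0
  | x :: xs => xs.countP (fun y => decide (y < x)) + invc xs

-- forward pass: `for i in rng` with the adjacent compare/swap; returns (list, sign factor, verified)
def fwdPass : List Int → List Int × Int × Bool
  | a :: b :: r =>
    if b < a then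
      let p := fwdPass (a :: r)
      (b :: p.1, -p.2.1, false)
    else
      let p := fwdPass (b :: r)
      (a :: p.1, p.2.1, p.2.2)
  | l => (l, 1, true)

-- backward pass: `for i in rev` (indices len-3 … 0, descending; the last pair is skipped)
def bwdPass : List Int → List Int × Int × Bool
  | a :: b :: c :: r =>
    match bwdPass (b :: c :: r) with
    | (b' :: rest, s, v) => if b' < a then (b' :: a :: rest, -s, false) else (a :: b' :: rest, s, v)
    | ([], s, v) => ([a], s, v)   -- unreachable: the recursive pass preserves length
  | l => (l, 1, true)

def loopA : Nat → List Int → Int → List Int × Int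
  | fuel, l, sign =>
    match fwdPass l with
    | (l1, s1, true) => (l1, sign * s1)
    | (l1, s1, false) =>
      match fuel with
      | 0 => (l1, sign * s1)   -- unreachable: the fuel invc l bounds the number of sweeps
      | f + 1 =>
        match bwdPass l1 with
        | (l2, s2, _) => loopA f l2 (sign * s1 * s2)

def sort_anticommuting_py (to_sort : List Int) : List Int × Int :=
  loopA (invc to_sort) to_sort 1

-- ===== PORT B =====
-- the inner `while` of Source B: length of the run of keys > k at the tail, scanned from the right
def cntGtRev (k : Int) : List Int → Nat
  | [] => 0
  | x :: xs => if k < x then cntGtRev k xs + 1 else 0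

-- one iteration of Source B's `for x in to_sort`
def bStep (acc : List Int × Int) (x : Int) : List Int × Int :=
  let c := cntGtRev x acc.1.reverse
  let pos := acc.1.length - c
  (PySem.List.insert acc.1 (pos : Int) x, if c % 2 = 1 then -acc.2 else acc.2)

def sort_anticommuting_py_alt (to_sort : List Int) : List Int × Int :=
  to_sort.foldl bStep ([], 1)

-- ===== PRECONDITION & SPEC =====
def Spec_sort_anticommuting_py (to_sort : List Int) (out : List Int × Int) : Prop := out = sort_anticommuting_py_alt to_sort
instance (to_sort : List Int) (out : List Int × Int) : Decidable (Spec_sort_anticommuting_py to_sort out) := by unfold Spec_sort_anticommuting_py; infer_instance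

-- ===== CLAIM (what is proved, stated in full; the proofs are below) =====
def Claim_equal_sort_anticommuting_py : Prop := ∀ (to_sort : List Int), Dom_sort_anticommuting_py to_sort → Spec_sort_anticommuting_py to_sort (sort_anticommuting_py to_sort)

-- ===== LEMMAS AND PROOFS =====

theorem fwdPass_main (l : List Int) :
    (fwdPass l).1.Perm l ∧ invc (fwdPass l).1 ≤ invc l ∧
    (fwdPass l).2.1 = (-1 : ℤ) ^ (invc l - invc (fwdPass l).1) ∧
    ((fwdPass l).2.2 = true → (fwdPass l).1 = l ∧ List.Pairwise (· ≤ ·) l) ∧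
    ((fwdPass l).2.2 = false → invc (fwdPass l).1 < invc l) := by
  induction l using fwdPass.induct with
  | case1 a b r hba ih =>
    obtain ⟨hp, hle, hs, _, _⟩ := ih
    have hred : fwdPass (a :: b :: r) =
        (b :: (fwdPass (a :: r)).1, -(fwdPass (a :: r)).2.1, false) := by
      simp [fwdPass, if_pos hba]
    rw [hred]; dsimp only
    have hcb : (fwdPass (a :: r)).1.countP (fun y => decide (y < b))
        = r.countP (fun y => decide (y < b)) := by
      rw [hp.countP_eq]
      simp [List.countP_cons, not_lt.mpr (le_of_lt hba)]
    have e1 : invc (b :: (fwdPass (a :: r)).1)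
        = r.countP (fun y => decide (y < b)) + invc (fwdPass (a :: r)).1 := by
      simp [invc, hcb]
    have e2 : invc (a :: b :: r) = 1 + r.countP (fun y => decide (y < a))
        + (r.countP (fun y => decide (y < b)) + invc r) := by
      simp [invc, List.countP_cons, hba]
      omega
    have e3 : invc (a :: r) = r.countP (fun y => decide (y < a)) + invc r := by
      simp [invc]
    refine ⟨(hp.cons b).trans (List.Perm.swap a b r), by omega, ?_, by simp, by intro _; omega⟩
    have hexp : invc (a :: b :: r) - invc (b :: (fwdPass (a :: r)).1)
        = (invc (a :: r) - invc (fwdPass (a :: r)).1) + 1 := by omega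
    rw [hexp, pow_succ, hs]
    ring
  | case2 a b r hba ih =>
    obtain ⟨hp, hle, hs, hv, hnv⟩ := ih
    have hred : fwdPass (a :: b :: r) =
        (a :: (fwdPass (b :: r)).1, (fwdPass (b :: r)).2.1, (fwdPass (b :: r)).2.2) := by
      simp [fwdPass, if_neg hba]
    rw [hred]; dsimp only
    have hca : (fwdPass (b :: r)).1.countP (fun y => decide (y < a))
        = (b :: r).countP (fun y => decide (y < a)) := hp.countP_eq _
    have e1 : invc (a :: (fwdPass (b :: r)).1)
        = (b :: r).countP (fun y => decide (y < a)) + invc (fwdPass (b :: r)).1 := by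
      simp [invc, hca]
    have e2 : invc (a :: b :: r)
        = (b :: r).countP (fun y => decide (y < a)) + invc (b :: r) := by
      simp [invc]
    refine ⟨hp.cons a, by omega, ?_, ?_, ?_⟩
    · have hexp : invc (a :: b :: r) - invc (a :: (fwdPass (b :: r)).1)
          = invc (b :: r) - invc (fwdPass (b :: r)).1 := by omega
      rw [hexp, hs]
    · intro hvt
      obtain ⟨he, hpw⟩ := hv hvt
      rw [he]
      refine ⟨rfl, List.Pairwise.cons ?_ hpw⟩
      intro y hy
      rcases List.mem_cons.mp hy with h' | h'
      · omega
      · have hb : b ≤ y := (List.pairwise_cons.mp hpw).1 y h'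
        omega
    · intro hvf
      have := hnv hvf
      omega
  | case3 l h =>
    rcases l with _ | ⟨a, l'⟩
    · refine ⟨?_, ?_, ?_, ?_, ?_⟩ <;> simp [fwdPass]
    rcases l' with _ | ⟨b, r⟩
    · refine ⟨?_, ?_, ?_, ?_, ?_⟩ <;> simp [fwdPass]
    · exact (h a b r rfl).elim

theorem bwdPass_main (l : List Int) :
    (bwdPass l).1.Perm l ∧ invc (bwdPass l).1 ≤ invc l ∧
    (bwdPass l).2.1 = (-1 : ℤ) ^ (invc l - invc (bwdPass l).1) := by
  induction l using bwdPass.induct with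
  | case1 a b c r b' rest s v hrec hba ih =>
    obtain ⟨hp, hle, hs⟩ := ih
    rw [hrec] at hp hle hs
    dsimp only at hp hle hs
    have hred : bwdPass (a :: b :: c :: r) = (b' :: a :: rest, -s, false) := by
      simp [bwdPass, hrec, if_pos hba]
    rw [hred]; dsimp only
    have hC : (b' :: rest).countP (fun y => decide (y < a))
        = (b :: c :: r).countP (fun y => decide (y < a)) := hp.countP_eq _
    have f1 : (b' :: rest).countP (fun y => decide (y < a))
        = 1 + rest.countP (fun y => decide (y < a)) := by
      simp [List.countP_cons, hba]
      omega
    have f2 : invc (b' :: rest) = rest.countP (fun y => decide (y < b')) + invc rest := by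
      simp [invc]
    have f3 : invc (b' :: a :: rest) = rest.countP (fun y => decide (y < b'))
        + (rest.countP (fun y => decide (y < a)) + invc rest) := by
      simp [invc, List.countP_cons, not_lt.mpr (le_of_lt hba)] <;> omega
    have f4 : invc (a :: b :: c :: r)
        = (b :: c :: r).countP (fun y => decide (y < a)) + invc (b :: c :: r) := by
      simp [invc]
    refine ⟨(List.Perm.swap a b' rest).trans (hp.cons a), by omega, ?_⟩
    have hexp : invc (a :: b :: c :: r) - invc (b' :: a :: rest)
        = (invc (b :: c :: r) - invc (b' :: rest)) + 1 := by omega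
    rw [hexp, pow_succ, hs]
    ring
  | case2 a b c r b' rest s v hrec hba ih =>
    obtain ⟨hp, hle, hs⟩ := ih
    rw [hrec] at hp hle hs
    dsimp only at hp hle hs
    have hred : bwdPass (a :: b :: c :: r) = (a :: b' :: rest, s, v) := by
      simp [bwdPass, hrec, if_neg hba]
    rw [hred]; dsimp only
    have hC : (b' :: rest).countP (fun y => decide (y < a))
        = (b :: c :: r).countP (fun y => decide (y < a)) := hp.countP_eq _
    have f1 : invc (a :: b' :: rest)
        = (b' :: rest).countP (fun y => decide (y < a)) + invc (b' :: rest) := by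
      simp [invc]
    have f4 : invc (a :: b :: c :: r)
        = (b :: c :: r).countP (fun y => decide (y < a)) + invc (b :: c :: r) := by
      simp [invc]
    refine ⟨hp.cons a, by omega, ?_⟩
    have hexp : invc (a :: b :: c :: r) - invc (a :: b' :: rest)
        = invc (b :: c :: r) - invc (b' :: rest) := by omega
    rw [hexp, hs]
  | case3 a b c r s v hrec ih =>
    obtain ⟨hp, _, _⟩ := ih
    rw [hrec] at hp
    dsimp only at hp
    exact absurd hp.symm (by simp)
  | case4 l h =>
    rcases l with _ | ⟨a, l'⟩
    · refine ⟨?_, ?_, ?_⟩ <;> simp [bwdPass]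
    rcases l' with _ | ⟨b, l''⟩
    · refine ⟨?_, ?_, ?_⟩ <;> simp [bwdPass]
    rcases l'' with _ | ⟨c, r⟩
    · refine ⟨?_, ?_, ?_⟩ <;> simp [bwdPass]
    · exact (h a b c r rfl).elim

theorem pairwise_invc_zero (l : List Int) (h : List.Pairwise (· ≤ ·) l) : invc l = 0 := by
  induction l with
  | nil => rfl
  | cons a xs ih =>
    obtain ⟨ha, hxs⟩ := List.pairwise_cons.mp h
    have : xs.countP (fun y => decide (y < a)) = 0 := by
      rw [List.countP_eq_zero]
      intro y hy
      simpa using not_lt.mpr (ha y hy)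
    simp [invc, this, ih hxs]

theorem loopA_spec (fuel : Nat) : ∀ (l : List Int) (sign : Int), invc l ≤ fuel →
    (loopA fuel l sign).1.Perm l ∧ List.Pairwise (· ≤ ·) (loopA fuel l sign).1 ∧
    (loopA fuel l sign).2 = sign * (-1 : ℤ) ^ (invc l) := by
  induction fuel with
  | zero =>
    intro l sign hfl
    obtain ⟨hp, hle, hs, hv, hnv⟩ := fwdPass_main l
    cases hf : fwdPass l with
    | mk l1 sv =>
      cases sv with
      | mk s1 v =>
        rw [hf] at hp hle hs hv hnv
        dsimp only at hp hle hs hv hnv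
        cases v with
        | true =>
          obtain ⟨he, hpw⟩ := hv rfl
          subst he
          rw [loopA.eq_def]
          dsimp only
          rw [hf]
          dsimp only
          refine ⟨List.Perm.refl _, hpw, ?_⟩
          rw [hs, pairwise_invc_zero _ hpw]
        | false =>
          exact absurd (hnv rfl) (by omega)
  | succ f ih =>
    intro l sign hfl
    obtain ⟨hp1, hle1, hs1, hv, hnv⟩ := fwdPass_main l
    cases hf : fwdPass l with
    | mk l1 sv =>
      cases sv with
      | mk s1 v =>
        rw [hf] at hp1 hle1 hs1 hv hnv
        dsimp only at hp1 hle1 hs1 hv hnv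
        cases v with
        | true =>
          obtain ⟨he, hpw⟩ := hv rfl
          subst he
          rw [loopA.eq_def]
          dsimp only
          rw [hf]
          dsimp only
          refine ⟨List.Perm.refl _, hpw, ?_⟩
          rw [hs1, pairwise_invc_zero _ hpw]
        | false =>
          have hdec : invc l1 < invc l := hnv rfl
          obtain ⟨hp2, hle2, hs2⟩ := bwdPass_main l1
          cases hb : bwdPass l1 with
          | mk l2 sv2 =>
            cases sv2 with
            | mk s2 v2 =>
              rw [hb] at hp2 hle2 hs2
              dsimp only at hp2 hle2 hs2
              rw [loopA.eq_def]
              dsimp only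
              rw [hf]
              dsimp only
              rw [hb]
              dsimp only
              obtain ⟨ihp, ihpw, ihs⟩ := ih l2 (sign * s1 * s2) (by omega)
              refine ⟨ihp.trans (hp2.trans hp1), ihpw, ?_⟩
              rw [ihs, hs1, hs2]
              have hpow : (-1 : ℤ) ^ (invc l - invc l1) * (-1 : ℤ) ^ (invc l1 - invc l2) * (-1 : ℤ) ^ (invc l2)
                  = (-1 : ℤ) ^ (invc l) := by
                rw [← pow_add, ← pow_add]
                congr 1
                omega
              calc sign * (-1:ℤ)^(invc l - invc l1) * (-1:ℤ)^(invc l1 - invc l2) * (-1:ℤ)^(invc l2)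
                  = sign * ((-1:ℤ)^(invc l - invc l1) * (-1:ℤ)^(invc l1 - invc l2) * (-1:ℤ)^(invc l2)) := by ring
                _ = sign * (-1:ℤ)^(invc l) := by rw [hpow]

-- cntGtRev on an antitone list counts ALL elements > k
theorem cntGtRev_antitone (k : Int) (m : List Int) (h : List.Pairwise (· ≥ ·) m) :
    cntGtRev k m = m.countP (fun y => decide (k < y)) := by
  induction m with
  | nil => rfl
  | cons a ms ih =>
    obtain ⟨ha, hms⟩ := List.pairwise_cons.mp h
    by_cases hk : k < a
    · simp [cntGtRev, hk, List.countP_cons, ih hms] <;> omega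
    · have h0 : ms.countP (fun y => decide (k < y)) = 0 := by
        rw [List.countP_eq_zero]
        intro y hy
        have : y ≤ a := ha y hy
        simpa using not_lt.mpr (le_trans this (not_lt.mp hk))
      simp [cntGtRev, hk, List.countP_cons, h0]

theorem cntGtRev_sorted (k : Int) (acc : List Int) (h : List.Pairwise (· ≤ ·) acc) :
    cntGtRev k acc.reverse = acc.countP (fun y => decide (k < y)) := by
  rw [cntGtRev_antitone k acc.reverse (by rwa [List.pairwise_reverse]), List.countP_reverse]

-- inserting behind the run of strictly greater elements keeps the list sorted and is a cons-permutation
theorem insert_sorted_perm (x : Int) (acc : List Int) (h : List.Pairwise (· ≤ ·) acc) :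
    (acc.take (acc.length - acc.countP (fun y => decide (x < y))) ++
      x :: acc.drop (acc.length - acc.countP (fun y => decide (x < y)))).Perm (x :: acc) ∧
    List.Pairwise (· ≤ ·)
      (acc.take (acc.length - acc.countP (fun y => decide (x < y))) ++
        x :: acc.drop (acc.length - acc.countP (fun y => decide (x < y)))) := by
  induction acc with
  | nil => simp
  | cons a as ih =>
    obtain ⟨ha, has⟩ := List.pairwise_cons.mp h
    by_cases hx : x < a
    · have hall : ∀ y ∈ a :: as, x < y := by
        intro y hy
        rcases List.mem_cons.mp hy with h' | h'
        · omega
        · exact lt_of_lt_of_le hx (ha y h')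
      have hc : (a :: as).countP (fun y => decide (x < y)) = (a :: as).length := by
        rw [List.countP_eq_length]
        intro y hy
        simpa using hall y hy
      rw [hc]
      simp only [Nat.sub_self, List.take_zero, List.drop_zero, List.nil_append]
      refine ⟨List.Perm.refl _, List.Pairwise.cons ?_ h⟩
      intro y hy
      exact le_of_lt (hall y hy)
    · have hc : (a :: as).countP (fun y => decide (x < y)) = as.countP (fun y => decide (x < y)) := by
        simp [List.countP_cons, hx]
      have hcle : as.countP (fun y => decide (x < y)) ≤ as.length := List.countP_le_length
      have hlen : (a :: as).length - (a :: as).countP (fun y => decide (x < y))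
          = (as.length - as.countP (fun y => decide (x < y))) + 1 := by
        rw [hc]
        simp only [List.length_cons]
        omega
      rw [hlen]
      simp only [List.take_succ_cons, List.drop_succ_cons, List.cons_append]
      obtain ⟨ihp, ihpw⟩ := ih has
      constructor
      · exact (ihp.cons a).trans (List.Perm.swap x a as)
      · refine List.pairwise_cons.mpr ⟨?_, ihpw⟩
        intro y hy
        have hy' : y ∈ x :: as := (ihp.mem_iff).mp hy
        rcases List.mem_cons.mp hy' with h' | h'
        · omega
        · exact ha y h'

-- crossC acc l = total number of (element of acc) > (element of l) pairs
def crossC (acc l : List Int) : Nat :=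
  (l.map (fun x => acc.countP (fun y => decide (x < y)))).sum

theorem crossC_cons (acc : List Int) (x : Int) (l : List Int) :
    crossC acc (x :: l) = acc.countP (fun y => decide (x < y)) + crossC acc l := by
  simp [crossC]

theorem crossC_perm (acc acc' l : List Int) (h : acc.Perm acc') : crossC acc l = crossC acc' l := by
  simp only [crossC]
  congr 1
  exact List.map_congr_left (fun x _ => h.countP_eq _)

theorem crossC_append (a b l : List Int) : crossC (a ++ b) l = crossC a l + crossC b l := by
  induction l with
  | nil => simp [crossC]
  | cons x xs ih =>
    simp only [crossC_cons, List.countP_append, ih]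
    omega

theorem crossC_singleton (x : Int) (l : List Int) :
    crossC [x] l = l.countP (fun y => decide (y < x)) := by
  induction l with
  | nil => rfl
  | cons a as ih =>
    rw [crossC_cons, ih, List.countP_cons]
    by_cases h : a < x <;> simp [h, List.countP_cons] <;> omega

theorem bFold_spec (l : List Int) : ∀ (acc : List Int) (s : Int),
    List.Pairwise (· ≤ ·) acc →
    (l.foldl bStep (acc, s)).1.Perm (acc ++ l) ∧
    List.Pairwise (· ≤ ·) (l.foldl bStep (acc, s)).1 ∧
    (l.foldl bStep (acc, s)).2 = s * (-1 : ℤ) ^ (crossC acc l + invc l) := by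
  induction l with
  | nil =>
    intro acc s h
    exact ⟨by simp, h, by simp [crossC, invc]⟩
  | cons x xs ih =>
    intro acc s h
    simp only [List.foldl_cons]
    have hc : cntGtRev x acc.reverse = acc.countP (fun y => decide (x < y)) :=
      cntGtRev_sorted x acc h
    set c := acc.countP (fun y => decide (x < y)) with hcdef
    have hcle : c ≤ acc.length := List.countP_le_length
    have hins : PySem.List.insert acc ((acc.length - c : Nat) : Int) x
        = acc.take (acc.length - c) ++ x :: acc.drop (acc.length - c) :=
      PySem.List.insert_natCast acc (acc.length - c) x (Nat.sub_le _ _)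
    obtain ⟨hp, hpw⟩ := insert_sorted_perm x acc h
    have hstep : bStep (acc, s) x
        = (acc.take (acc.length - c) ++ x :: acc.drop (acc.length - c),
           if c % 2 = 1 then -s else s) := by
      simp only [bStep, hc, hins]
    rw [hstep]
    obtain ⟨ihp, ihpw, ihs⟩ := ih _ (if c % 2 = 1 then -s else s) hpw
    refine ⟨?_, ihpw, ?_⟩
    · refine ihp.trans ?_
      refine (hp.append_right xs).trans ?_
      simp only [List.cons_append]
      exact List.perm_middle.symm
    · rw [ihs]
      have hcross : crossC (acc.take (acc.length - c) ++ x :: acc.drop (acc.length - c)) xs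
          = crossC acc xs + xs.countP (fun y => decide (y < x)) := by
        rw [crossC_perm _ (x :: acc) _ hp, show (x :: acc) = [x] ++ acc from rfl,
          crossC_append, crossC_singleton]
        omega
      have hinv : invc (x :: xs) = xs.countP (fun y => decide (y < x)) + invc xs := by
        simp [invc]
      have hexp : crossC (acc.take (acc.length - c) ++ x :: acc.drop (acc.length - c)) xs + invc xs
          + c = crossC acc (x :: xs) + invc (x :: xs) := by
        rw [hcross, hinv, crossC_cons]
        omega
      have hsplit : (-1 : ℤ) ^ (crossC acc (x :: xs) + invc (x :: xs))
          = (-1 : ℤ) ^ (crossC (acc.take (acc.length - c) ++ x :: acc.drop (acc.length - c)) xs + invc xs) * (-1 : ℤ) ^ c := by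
        rw [← pow_add, hexp]
      by_cases hpar : c % 2 = 1
      · simp only [if_pos hpar]
        rw [hsplit, Odd.neg_one_pow (Nat.odd_iff.mpr hpar)]
        ring
      · simp only [if_neg hpar]
        have hc0 : c % 2 = 0 := by omega
        rw [hsplit, Even.neg_one_pow (Nat.even_iff.mpr hc0)]
        ring

-- ===== VERDICT (by name: the statement is the Claim_ definition above) =====
theorem sort_anticommuting_py_spec : Claim_equal_sort_anticommuting_py := by
  intro l _
  unfold Spec_sort_anticommuting_py sort_anticommuting_py sort_anticommuting_py_alt
  obtain ⟨hap, hapw, has⟩ := loopA_spec (invc l) l 1 le_rfl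
  obtain ⟨hbp, hbpw, hbs⟩ := bFold_spec l [] 1 List.Pairwise.nil
  simp only [List.nil_append] at hbp
  have hlist : (loopA (invc l) l 1).1 = (l.foldl bStep ([], 1)).1 :=
    List.Perm.eq_of_pairwise (fun a b _ _ h1 h2 => le_antisymm h1 h2) hapw hbpw (hap.trans hbp.symm)
  have hsign : (loopA (invc l) l 1).2 = (l.foldl bStep ([], 1)).2 := by
    rw [has, hbs]
    simp [crossC]
  exact Prod.ext hlist hsign
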